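-- pv_equiv track=rewrite | github.com/rajvanshneerav1-gif/Beta-Calculator | beta_app.py | region_tag
-- ===== SOURCE A (Python) =====
-- def region_tag(region: str) -> str:
--     r = region.lower()
--     if "india"    in r: return "tag-india"
--     if "united s" in r: return "tag-us"
--     if "united k" in r: return "tag-uk"
--     if any(x in r for x in ["germany","france","italy","spain","nether","sweden","norway","denmark","finland","belgium","austria","portugal"]): return "tag-eu"
--     if any(x in r for x in ["japan","china","hong kong","korea","singapore","taiwan","thailand","malaysia","indonesia","philippines"]): return "tag-asia"
--     return "tag-other"
-- ===== SOURCE B (Python) =====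
-- # One flat keyword->tag map, scanned exhaustively; the answer is the matched
-- # tag of smallest priority (min with key), instead of an ordered early-return chain.
-- KW = {
--     "india": "tag-india",
--     "united s": "tag-us",
--     "united k": "tag-uk",
--     "germany": "tag-eu", "france": "tag-eu", "italy": "tag-eu", "spain": "tag-eu",
--     "nether": "tag-eu", "sweden": "tag-eu", "norway": "tag-eu", "denmark": "tag-eu",
--     "finland": "tag-eu", "belgium": "tag-eu", "austria": "tag-eu", "portugal": "tag-eu",
--     "japan": "tag-asia", "china": "tag-asia", "hong kong": "tag-asia",
--     "korea": "tag-asia", "singapore": "tag-asia", "taiwan": "tag-asia",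
--     "thailand": "tag-asia", "malaysia": "tag-asia", "indonesia": "tag-asia",
--     "philippines": "tag-asia",
-- }
-- PRIO = {"tag-india": 0, "tag-us": 1, "tag-uk": 2, "tag-eu": 3, "tag-asia": 4}
--
-- def region_tag(region: str) -> str:
--     r = region.lower()
--     matches = [tag for kw, tag in KW.items() if kw in r]
--     return min(matches, key=PRIO.get, default="tag-other")
-- ===== Notes on version B (the rewrite author's own statement) =====
-- stated objective: alternative
-- what changed: Replaced the ordered early-return if-chain with an exhaustive scan of one flat keyword-to-tag map, collecting every matching tag and returning the one of minimal priority via min with a key (priority order is data, not control flow).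
import Mathlib
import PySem

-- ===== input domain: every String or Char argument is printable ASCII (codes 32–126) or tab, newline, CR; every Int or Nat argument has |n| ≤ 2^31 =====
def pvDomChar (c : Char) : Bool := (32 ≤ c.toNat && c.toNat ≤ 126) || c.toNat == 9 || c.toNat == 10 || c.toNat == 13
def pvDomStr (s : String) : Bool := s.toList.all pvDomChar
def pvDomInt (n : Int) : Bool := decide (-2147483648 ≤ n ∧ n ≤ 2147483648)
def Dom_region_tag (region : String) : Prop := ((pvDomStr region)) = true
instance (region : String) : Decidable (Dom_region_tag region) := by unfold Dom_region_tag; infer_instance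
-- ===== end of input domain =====

-- B replaces A's ordered early-return chain by an exhaustive scan of one flat keyword→tag map,
-- returning the matched tag of minimal priority (alternative decomposition; same cost).

-- ===== PORT A =====
def region_tag (region : String) : String :=
  let r := PySem.Str.lower region
  if PySem.Str.isIn "india" r then "tag-india"
  else if PySem.Str.isIn "united s" r then "tag-us"
  else if PySem.Str.isIn "united k" r then "tag-uk"
  else if (["germany","france","italy","spain","nether","sweden","norway","denmark","finland","belgium","austria","portugal"].any (fun x => PySem.Str.isIn x r)) then "tag-eu"
  else if (["japan","china","hong kong","korea","singapore","taiwan","thailand","malaysia","indonesia","philippines"].any (fun x => PySem.Str.isIn x r)) then "tag-asia"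
  else "tag-other"

-- ===== PORT B =====
-- the dict KW as an association list in insertion order
def pvKW : List (String × String) :=
  [("india","tag-india"),
   ("united s","tag-us"),
   ("united k","tag-uk"),
   ("germany","tag-eu"),("france","tag-eu"),("italy","tag-eu"),("spain","tag-eu"),
   ("nether","tag-eu"),("sweden","tag-eu"),("norway","tag-eu"),("denmark","tag-eu"),
   ("finland","tag-eu"),("belgium","tag-eu"),("austria","tag-eu"),("portugal","tag-eu"),
   ("japan","tag-asia"),("china","tag-asia"),("hong kong","tag-asia"),
   ("korea","tag-asia"),("singapore","tag-asia"),("taiwan","tag-asia"),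
   ("thailand","tag-asia"),("malaysia","tag-asia"),("indonesia","tag-asia"),
   ("philippines","tag-asia")]

def pvPRIO : PySem.Dict String Int :=
  PySem.Dict.ofList [("tag-india",0),("tag-us",1),("tag-uk",2),("tag-eu",3),("tag-asia",4)]

-- key=PRIO.get; every tag in KW is a key of PRIO, so the default is never consulted
def pvKey (t : String) : Int := PySem.Dict.getD pvPRIO t 0

def region_tag_alt (region : String) : String :=
  let r := PySem.Str.lower region
  let ms := (pvKW.filter (fun p => PySem.Str.isIn p.1 r)).map Prod.snd
  PySem.List.minD ms pvKey "tag-other"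

-- ===== PRECONDITION & SPEC =====
def Spec_region_tag (region : String) (out : String) : Prop := out = region_tag_alt region
instance (region : String) (out : String) : Decidable (Spec_region_tag region out) := by unfold Spec_region_tag; infer_instance

-- ===== CLAIM (what is proved, stated in full; the proofs are below) =====
def Claim_equal_region_tag : Prop := ∀ (region : String), Dom_region_tag region → Spec_region_tag region (region_tag region)

-- ===== LEMMAS AND PROOFS =====

-- the fold step of PySem.List.min?
def pvStep (acc : Option String) (x : String) : Option String :=
  match acc with
  | none => some x
  | some m => if pvKey x < pvKey m then some x else some m

theorem pvMin?_eq (xs : List String) :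
    PySem.List.min? xs pvKey = xs.foldl pvStep none := by
  unfold PySem.List.min? pvStep
  congr 1
  funext acc x
  cases acc <;> rfl

theorem pvStay (m : String) (l : List String) (h : ∀ x ∈ l, pvKey m ≤ pvKey x) :
    l.foldl pvStep (some m) = some m := by
  induction l with
  | nil => rfl
  | cons a t ih =>
      have ha : pvKey m ≤ pvKey a := h a (by simp)
      simp only [List.foldl_cons, pvStep, if_neg (not_lt.mpr ha)]
      exact ih (fun x hx => h x (by simp [hx]))

theorem pvStart (t : String) (l : List String) (hne : l ≠ [])
    (h : ∀ x ∈ l, x = t) : l.foldl pvStep none = some t := by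
  cases l with
  | nil => exact absurd rfl hne
  | cons a s =>
      have ha : a = t := h a (by simp)
      subst ha
      simp only [List.foldl_cons, pvStep]
      exact pvStay a s (fun x hx => by rw [h x (by simp [hx])])

-- every snd in the eu / asia blocks of pvKW is the block's tag
theorem pvAllEq (g : List (String × String)) (t : String)
    (hg : ∀ p ∈ g, p.2 = t) (pred : String × String → Bool) :
    ∀ x ∈ (g.filter pred).map Prod.snd, x = t := by
  intro x hx
  obtain ⟨p, hp, rfl⟩ := List.mem_map.mp hx
  exact hg p (List.mem_filter.mp hp).1

theorem pvEmptyIff (g : List (String × String)) (pred : String × String → Bool) :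
    (g.filter pred).map Prod.snd = [] ↔ ∀ p ∈ g, pred p = false := by
  simp [List.filter_eq_nil_iff]

theorem pvBlock (t : String) (l rest : List String) (hl : ∀ x ∈ l, x = t)
    (hrest : ∀ x ∈ rest, pvKey t ≤ pvKey x) :
    (l ++ rest).foldl pvStep none =
      if l = [] then rest.foldl pvStep none else some t := by
  by_cases h : l = []
  · simp [h]
  · rw [List.foldl_append, pvStart t l h hl, pvStay t rest hrest, if_neg h]

-- ===== VERDICT (by name: the statement is the Claim_ definition above) =====
theorem pvLast (t : String) (l : List String) (hl : ∀ x ∈ l, x = t) :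
    l.foldl pvStep none = if l = [] then none else some t := by
  have h := pvBlock t l [] hl (by simp)
  simpa using h

def pvB0 : List (String × String) := [("india","tag-india")]
def pvB1 : List (String × String) := [("united s","tag-us")]
def pvB2 : List (String × String) := [("united k","tag-uk")]
def pvB3 : List (String × String) :=
  [("germany","tag-eu"),("france","tag-eu"),("italy","tag-eu"),("spain","tag-eu"),
   ("nether","tag-eu"),("sweden","tag-eu"),("norway","tag-eu"),("denmark","tag-eu"),
   ("finland","tag-eu"),("belgium","tag-eu"),("austria","tag-eu"),("portugal","tag-eu")]
def pvB4 : List (String × String) :=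
  [("japan","tag-asia"),("china","tag-asia"),("hong kong","tag-asia"),
   ("korea","tag-asia"),("singapore","tag-asia"),("taiwan","tag-asia"),
   ("thailand","tag-asia"),("malaysia","tag-asia"),("indonesia","tag-asia"),
   ("philippines","tag-asia")]

theorem pvKW_split : pvKW = pvB0 ++ pvB1 ++ pvB2 ++ pvB3 ++ pvB4 := rfl

theorem pvFlip (b : Bool) (P : Prop) (h : P ↔ b = false) : b = true ↔ ¬ P := by
  cases b <;> simp [h]

theorem region_tag_spec : Claim_equal_region_tag := by
  intro region _
  unfold Spec_region_tag region_tag region_tag_alt PySem.List.minD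
  simp only [pvMin?_eq]
  set r := PySem.Str.lower region with hr
  set pred := (fun p : String × String => PySem.Str.isIn p.1 r) with hpred
  rw [pvKW_split]
  simp only [List.filter_append, List.map_append, List.append_assoc]
  set l0 := (List.filter pred pvB0).map Prod.snd with hl0
  set l1 := (List.filter pred pvB1).map Prod.snd with hl1
  set l2 := (List.filter pred pvB2).map Prod.snd with hl2
  set l3 := (List.filter pred pvB3).map Prod.snd with hl3
  set l4 := (List.filter pred pvB4).map Prod.snd with hl4
  have h0 : ∀ x ∈ l0, x = "tag-india" := pvAllEq _ _ (by decide) pred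
  have h1 : ∀ x ∈ l1, x = "tag-us" := pvAllEq _ _ (by decide) pred
  have h2 : ∀ x ∈ l2, x = "tag-uk" := pvAllEq _ _ (by decide) pred
  have h3 : ∀ x ∈ l3, x = "tag-eu" := pvAllEq _ _ (by decide) pred
  have h4 : ∀ x ∈ l4, x = "tag-asia" := pvAllEq _ _ (by decide) pred
  have hr0 : ∀ x ∈ l1 ++ (l2 ++ (l3 ++ l4)), pvKey "tag-india" ≤ pvKey x := by
    intro x hx
    simp only [List.mem_append] at hx
    rcases hx with hx | hx | hx | hx
    · rw [h1 x hx]; decide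
    · rw [h2 x hx]; decide
    · rw [h3 x hx]; decide
    · rw [h4 x hx]; decide
  have hr1 : ∀ x ∈ l2 ++ (l3 ++ l4), pvKey "tag-us" ≤ pvKey x := by
    intro x hx
    simp only [List.mem_append] at hx
    rcases hx with hx | hx | hx
    · rw [h2 x hx]; decide
    · rw [h3 x hx]; decide
    · rw [h4 x hx]; decide
  have hr2 : ∀ x ∈ l3 ++ l4, pvKey "tag-uk" ≤ pvKey x := by
    intro x hx
    simp only [List.mem_append] at hx
    rcases hx with hx | hx
    · rw [h3 x hx]; decide
    · rw [h4 x hx]; decide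
  have hr3 : ∀ x ∈ l4, pvKey "tag-eu" ≤ pvKey x := by
    intro x hx
    rw [h4 x hx]; decide
  rw [pvBlock _ _ _ h0 hr0, pvBlock _ _ _ h1 hr1, pvBlock _ _ _ h2 hr2,
      pvBlock _ _ _ h3 hr3, pvLast _ _ h4]
  have e0 : (l0 = []) ↔ (PySem.Str.isIn "india" r = false) := by
    rw [hl0, pvEmptyIff]; simp [pvB0, hpred]
  have e1 : (l1 = []) ↔ (PySem.Str.isIn "united s" r = false) := by
    rw [hl1, pvEmptyIff]; simp [pvB1, hpred]
  have e2 : (l2 = []) ↔ (PySem.Str.isIn "united k" r = false) := by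
    rw [hl2, pvEmptyIff]; simp [pvB2, hpred]
  have e3 : (l3 = []) ↔ ((["germany","france","italy","spain","nether","sweden","norway","denmark","finland","belgium","austria","portugal"].any (fun x => PySem.Str.isIn x r)) = false) := by
    rw [hl3, pvEmptyIff]; simp [pvB3, hpred]
  have e4 : (l4 = []) ↔ ((["japan","china","hong kong","korea","singapore","taiwan","thailand","malaysia","indonesia","philippines"].any (fun x => PySem.Str.isIn x r)) = false) := by
    rw [hl4, pvEmptyIff]; simp [pvB4, hpred]
  have f0 : (PySem.Str.isIn "india" r = true) ↔ ¬ (l0 = []) := pvFlip _ _ e0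
  have f1 : (PySem.Str.isIn "united s" r = true) ↔ ¬ (l1 = []) := pvFlip _ _ e1
  have f2 : (PySem.Str.isIn "united k" r = true) ↔ ¬ (l2 = []) := pvFlip _ _ e2
  have f3 : ((["germany","france","italy","spain","nether","sweden","norway","denmark","finland","belgium","austria","portugal"].any (fun x => PySem.Str.isIn x r)) = true) ↔ ¬ (l3 = []) := pvFlip _ _ e3
  have f4 : ((["japan","china","hong kong","korea","singapore","taiwan","thailand","malaysia","indonesia","philippines"].any (fun x => PySem.Str.isIn x r)) = true) ↔ ¬ (l4 = []) := pvFlip _ _ e4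
  simp only [f0, f1, f2, f3, f4, ite_not,
    apply_ite (fun o : Option String => o.getD "tag-other"),
    Option.getD_some, Option.getD_none]
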